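-- pv_equiv track=rewrite | github.com/holtm16/HonorsThesis | norm_plus_breakings.py | find_zero_norm
-- ===== SOURCE A (Python) =====
-- def find_zero_norm(seq):
--     max_value = 0
--     indices_that_give_max_value = []
--     for i in range(len(seq)):
--         abs_val_of_element = abs(seq[i])
--         if abs_val_of_element == max_value:
--             # Add this index to list of elements giving max value
--             indices_that_give_max_value.append((i+1,))
--         elif abs_val_of_element > max_value:
--             # Update the max value
--             max_value = abs_val_of_element
--             # Reset the list of elements that give the max value
--             indices_that_give_max_value = [(i+1,)]
--     return (max_value, indices_that_give_max_value)
-- ===== SOURCE B (Python) =====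
-- def find_zero_norm(seq):
--     max_value = max(map(abs, seq), default=0)
--     return (max_value,
--             [(i + 1,) for i, x in enumerate(seq) if abs(x) == max_value])
-- ===== Notes on version B (the rewrite author's own statement) =====
-- stated objective: simpler
-- what changed: Replaces the fused single-pass accumulate-and-reset loop with two separate passes: first compute the maximum absolute value with builtin max (default 0), then collect all 1-based indices attaining it with a comprehension.
import Mathlib
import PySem

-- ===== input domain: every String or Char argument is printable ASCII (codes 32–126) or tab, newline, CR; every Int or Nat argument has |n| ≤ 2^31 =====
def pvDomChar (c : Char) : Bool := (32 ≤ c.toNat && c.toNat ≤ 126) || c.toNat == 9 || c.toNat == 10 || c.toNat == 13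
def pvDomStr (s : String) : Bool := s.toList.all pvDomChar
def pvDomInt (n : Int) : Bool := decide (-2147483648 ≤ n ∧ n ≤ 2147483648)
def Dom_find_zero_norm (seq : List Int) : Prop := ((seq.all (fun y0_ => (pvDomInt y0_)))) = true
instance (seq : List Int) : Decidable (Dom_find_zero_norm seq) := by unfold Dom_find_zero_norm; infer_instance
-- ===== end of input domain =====

-- B replaces A's fused accumulate-and-reset loop by two passes (max, then filter); same cost, simpler.

-- ===== PORT A =====
-- single pass over range(len(seq)); index i is always in range, so pyGetD's default 0 is never used
def find_zero_norm (seq : List Int) : Int × List (List Int) :=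
  (PySem.List.pyRange 0 (PySem.List.len seq) 1).foldl
    (fun st i =>
      let abs_val_of_element := |PySem.List.pyGetD seq i 0|
      if abs_val_of_element = st.1 then (st.1, st.2 ++ [[i + 1]])
      else if abs_val_of_element > st.1 then (abs_val_of_element, [[i + 1]])
      else st)
    (0, [])

-- ===== PORT B =====
-- max(map(abs, seq), default=0), then the comprehension over enumerate(seq)
def find_zero_norm_alt (seq : List Int) : Int × List (List Int) :=
  let max_value := PySem.List.maxD (seq.map (fun x => |x|)) (fun y => y) 0
  (max_value,
   (PySem.List.enumerate seq).filterMap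
     (fun p => if |p.2| = max_value then some [p.1 + 1] else none))

-- ===== PRECONDITION & SPEC =====
def Spec_find_zero_norm (seq : List Int) (out : Int × List (List Int)) : Prop := out = find_zero_norm_alt seq
instance (seq : List Int) (out : Int × List (List Int)) : Decidable (Spec_find_zero_norm seq out) := by unfold Spec_find_zero_norm; infer_instance

-- ===== CLAIM (what is proved, stated in full; the proofs are below) =====
def Claim_equal_find_zero_norm : Prop := ∀ (seq : List Int), Dom_find_zero_norm seq → Spec_find_zero_norm seq (find_zero_norm seq)

-- ===== LEMMAS AND PROOFS =====

-- A's loop body, viewed as a step on (index, element) pairs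
def pvStepA (st : Int × List (List Int)) (p : Int × Int) : Int × List (List Int) :=
  if |p.2| = st.1 then (st.1, st.2 ++ [[p.1 + 1]])
  else if |p.2| > st.1 then (|p.2|, [[p.1 + 1]])
  else st

-- invariant of A's loop: value = running max; list = indices attaining it (reset when the max grows)
lemma pvLoopA_char (seq : List Int) : ∀ (s : Int) (m : Int) (acc : List (List Int)), 0 ≤ m →
    (PySem.List.enumerate seq s).foldl pvStepA (m, acc) =
      (seq.foldl (fun a x => max a |x|) m,
       (if m = seq.foldl (fun a x => max a |x|) m then acc else []) ++
         (PySem.List.enumerate seq s).filterMap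
           (fun p => if |p.2| = seq.foldl (fun a x => max a |x|) m then some [p.1 + 1] else none)) := by
  induction seq with
  | nil => intro s m acc _; simp [PySem.List.enumerate_nil]
  | cons x t ih =>
    intro s m acc hm
    have hM := (PySem.List.le_foldl_max_int t (fun y => |y|) (max m |x|)).1
    rw [PySem.List.enumerate_cons]
    simp only [List.foldl_cons, List.filterMap_cons]
    rcases lt_trichotomy |x| m with h | h | h
    · -- abs < max : state unchanged, element excluded
      have hmax : max m |x| = m := max_eq_left h.le
      rw [show pvStepA (m, acc) (s, x) = (m, acc) by
        simp only [pvStepA]; rw [if_neg (by omega), if_neg (by omega)]]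
      simp only [hmax] at hM ⊢
      rw [ih (s+1) m acc hm]
      have hne : ¬ (|x| = t.foldl (fun a y => max a |y|) m) := by
        intro he; rw [← he] at hM; omega
      simp [hne]
    · -- abs = max : append index
      have hmax : max m |x| = m := by rw [← h]; exact max_self _
      rw [show pvStepA (m, acc) (s, x) = (m, acc ++ [[s + 1]]) by simp [pvStepA, h]]
      simp only [hmax] at ⊢
      rw [ih (s+1) m (acc ++ [[s + 1]]) hm]
      by_cases hMe : m = t.foldl (fun a y => max a |y|) m
      · have he : |x| = t.foldl (fun a y => max a |y|) m := h.trans hMe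
        rw [if_pos hMe, if_pos hMe, if_pos he]
        simp
      · have hne : ¬ (|x| = t.foldl (fun a y => max a |y|) m) := by rw [h]; exact hMe
        simp [hMe, hne]
    · -- abs > max : reset
      have hmax : max m |x| = |x| := max_eq_right h.le
      rw [show pvStepA (m, acc) (s, x) = (|x|, [[s + 1]]) by
        simp only [pvStepA]; rw [if_neg (by omega), if_pos h]]
      simp only [hmax] at hM ⊢
      rw [ih (s+1) |x| [[s + 1]] (abs_nonneg x)]
      have hmne : ¬ (m = t.foldl (fun a y => max a |y|) |x|) := by
        intro he; rw [← he] at hM; omega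
      by_cases hxe : |x| = t.foldl (fun a y => max a |y|) |x|
      · simp [← hxe, (show ¬ m = |x| by omega)]
      · simp [hxe, hmne]

-- A's range/index loop is the enumerate loop
lemma pvA_eq_enum (seq : List Int) :
    find_zero_norm seq = (PySem.List.enumerate seq).foldl pvStepA (0, []) := by
  unfold find_zero_norm
  rw [PySem.List.enumerate_eq_map_pyRange seq 0, List.foldl_map]
  rfl

-- B's max(map(abs, seq), default=0) is the running max seeded at 0
lemma pvMaxD_char (seq : List Int) :
    PySem.List.maxD (seq.map (fun x => |x|)) (fun y => y) 0 =
      seq.foldl (fun a x => max a |x|) 0 := by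
  cases seq with
  | nil => rfl
  | cons x t =>
    have h0 : max (0 : Int) |x| = |x| := max_eq_right (abs_nonneg x)
    have : PySem.List.maxD ((x :: t).map (fun x => |x|)) (fun y => y) 0 =
        (t.map (fun x => |x|)).foldl max |x| := by
      unfold PySem.List.maxD
      rw [List.map_cons, PySem.List.max?_id_cons]
      rfl
    rw [this, List.foldl_map, List.foldl_cons, h0]

-- ===== VERDICT (by name: the statement is the Claim_ definition above) =====
theorem find_zero_norm_spec : Claim_equal_find_zero_norm := by
  intro seq _
  show find_zero_norm seq = find_zero_norm_alt seq
  rw [pvA_eq_enum, pvLoopA_char seq 0 0 [] le_rfl]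
  unfold find_zero_norm_alt
  rw [pvMaxD_char]
  simp
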